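/-
  RESIDUES: `ResidueOK` = clauses R1–R9 of design/INVARIANTS.md §3.4, the lemmas that USE them at check sites, the FRAME lemma,
  and the transient `ResidueUpTo` (= RES(i) of CONTRACTS, start_decoder section R) of the residue loop of start_decoder.
  The documentation of the whole unit is the header of Vorbis/ResidueMapping.lean.
-/
import Vorbis.ResidueMapping.Arith
namespace Vorbis
open X86 X86.User Asan

/-! ### The block predicate `Blk`

A SHAPE clause says "this pointer field holds the base of an allocated block of this size". The structures of this unit take
the notion of "allocated block" as their FIRST parameter `Blk : Block → Prop`. Everything about it is in Vorbis/Blocks.lean: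
`BlkOK Blk` (in the data space, equal or disjoint), `BlkLive Blk Live` (an allocated block is live: asked by the USE lemmas
only), `Site Live a n` (what every USE lemma returns), `Block.Kept` (what a frame lemma asks of a block whose content is read),
`ObjEq ws mem p mem' f` (what it asks of the decoder object itself). -/

/-! ### Derived reads of a residue record

`r` is the address of a `Residue` record (`stb_vorbis.residue_config_at mem f i`). All are `@[vacc]`: `simp only [vacc, voff]`
unfolds them to typed reads, the form in which they meet the stepper's output. -/

/-- `cbk = f->codebooks + r->classbook`: the address of the class book of the residue at `r`. -/
@[vacc] def Residue.cbk (mem : Mem) (f r : Nat) : Nat := stb_vorbis.codebooks_at mem f (Residue.classbook mem r)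

/-- `E = cbk.entries` as a number: the number of rows of `r->classdata`. -/
@[vacc] def Residue.E (mem : Mem) (f r : Nat) : Nat := (Codebook.entries mem (Residue.cbk mem f r)).toNat

/-- `W = classwords = cbk.dimensions` as a number: the length in bytes of every row of `r->classdata`. -/
@[vacc] def Residue.W (mem : Mem) (f r : Nat) : Nat := (Codebook.dimensions mem (Residue.cbk mem f r)).toNat

/-- `r->residue_books[c][k]` (`int16 (*)[8]`: 16 bytes per class, 2 per pass), sign-extended as the `movsx` loads it. -/
@[vacc] def Residue.book (mem : Mem) (r c k : Nat) : Int := mem.i16 (Residue.residue_books mem r + 16 * c + 2 * k)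

/-- `r->classdata[q]`: the pointer to row `q`. -/
@[vacc] def Residue.row (mem : Mem) (r q : Nat) : Nat := mem.ptr (Residue.classdata mem r + 8 * q)

/-- `residue_books[c][k]` is element `8·c + k` of the generated accessor's flat `int16` array. -/
theorem Residue.book_eq_at (mem : Mem) (r c k : Nat) :
    Residue.book mem r c k = mem.i16 (Residue.residue_books_at mem r (8 * c + k)) := by
  simp only [vacc]
  congr 1
  omega

/-- `classdata[q]` is the generated accessor's element address. -/
theorem Residue.row_eq_at (mem : Mem) (r q : Nat) : Residue.row mem r q = mem.ptr (Residue.classdata_at mem r q) := by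
  simp only [vacc]

/-! ### R4–R8b: one record -/

/-- **The clauses R4 … R8b of INVARIANTS §3.4 for the residue record at address `r`.** (R3 is about `f->residue_types[i]`, a
field of `*f`: it is in `ResidueOK`.) `R8a` of the design is split in `R8a` (the table of pointers) and `R8a_row` (its rows). -/
structure ResidueAtOK (Blk : Block → Prop) (mem : Mem) (f r : Nat) : Prop where
  /-- R4 FIELD: `begin ≤ end < 2^24`. For: `n_read ≥ 0`; the monotonicity of `part_read` (T3). -/
  R4 : Residue.begin mem r ≤ Residue.end_ mem r ∧ Residue.end_ mem r < 2 ^ 24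
  /-- R5 FIELD: `1 ≤ part_size ≤ 2^24`. For: the two `div [r+8]`. -/
  R5 : 1 ≤ Residue.part_size mem r ∧ Residue.part_size mem r ≤ 2 ^ 24
  /-- R6 FIELD: `1 ≤ classifications ≤ 64`. For: the two `idiv` of the classdata loop; the size of `residue_books`. -/
  R6 : 1 ≤ Residue.classifications mem r ∧ Residue.classifications mem r ≤ 64
  /-- R7 FIELD: `classbook < codebook_count`. For: `cb(r.classbook)`. -/
  R7 : (Residue.classbook mem r : Int) < stb_vorbis.codebook_count mem f
  /-- R7b (derived from K1 / FIX 6): `classwords ≥ 1`. For: termination of `while (pcount < part_read)`. -/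
  R7b : 1 ≤ Residue.W mem f r
  /-- R8 SHAPE: `Block(residue_books, 16·classifications)`. -/
  R8 : Blk ⟨Residue.residue_books mem r, 16 * Residue.classifications mem r⟩
  /-- R8c CONTENT: every `residue_books[j][k]` is `−1` or a codebook number. For: `cb(b)` when `b ≥ 0`. -/
  R8c : ∀ j k : Nat, j < Residue.classifications mem r → k < 8 →
    Residue.book mem r j k = -1 ∨ (0 ≤ Residue.book mem r j k ∧ Residue.book mem r j k < stb_vorbis.codebook_count mem f)
  /-- R8a SHAPE, first half: `Block(classdata, 8·E)`: one pointer per entry of the class book. -/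
  R8a : Blk ⟨Residue.classdata mem r, 8 * Residue.E mem f r⟩
  /-- R8a SHAPE, second half: every row `classdata[q]`, `q < E`, is a block of `classwords` bytes. -/
  R8a_row : ∀ q : Nat, q < Residue.E mem f r → Blk ⟨Residue.row mem r q, Residue.W mem f r⟩
  /-- R8b CONTENT: every byte of every row is a class number `< classifications`. For: `residue_books[c]`. -/
  R8b : ∀ q k : Nat, q < Residue.E mem f r → k < Residue.W mem f r →
    mem.u8 (Residue.row mem r q + k) < Residue.classifications mem r

/-! ### R1–R8b: all records; and the records below a counter (the transient RES(i)) -/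

/-- **`ResidueOK`: clauses R1–R8b of INVARIANTS §3.4** (R9, the form vorbis_deinit needs, is `ResidueDeinitOK` below; it
follows: `ResidueOK.deinit`). Established by start_decoder 4039–4087 (SD.7), read-only afterwards. -/
structure ResidueOK (Blk : Block → Prop) (mem : Mem) (f : Nat) : Prop where
  /-- R1 FIELD: `1 ≤ residue_count ≤ 64`. For: `residue_types[·]` (64 entries inside `*f`), loops. -/
  R1 : 1 ≤ stb_vorbis.residue_count mem f ∧ stb_vorbis.residue_count mem f ≤ 64
  /-- R2 SHAPE: `Block(residue_config, 32·residue_count)`. For: `residue_config + rn`. -/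
  R2 : Blk ⟨stb_vorbis.residue_config mem f, Off.sizeof.Residue * (stb_vorbis.residue_count mem f).toNat⟩
  /-- R3 CONTENT (u16[64] inside `*f`): `residue_types[i] ≤ 2`. For: decode_residue's case split; FIX 9. -/
  R3 : ∀ i : Nat, (i : Int) < stb_vorbis.residue_count mem f → stb_vorbis.residue_types mem f i ≤ 2
  /-- R4–R8b for every record. -/
  record : ∀ i : Nat, (i : Int) < stb_vorbis.residue_count mem f →
    ResidueAtOK Blk mem f (stb_vorbis.residue_config_at mem f i)

/-- **RES(n) without its zero part** (CONTRACTS, start_decoder section R): R1, R2, and R3–R8b for the records `i < n`. The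
invariant of the residue loop 4043 is `ResidueUpTo … i ∧ ResidueZeroFrom … i`; `ResidueOK` is `ResidueUpTo … residue_count`. -/
structure ResidueUpTo (Blk : Block → Prop) (mem : Mem) (f n : Nat) : Prop where
  /-- the counter is at most `residue_count` -/
  n_le : (n : Int) ≤ stb_vorbis.residue_count mem f
  /-- R1 -/
  R1 : 1 ≤ stb_vorbis.residue_count mem f ∧ stb_vorbis.residue_count mem f ≤ 64
  /-- R2 -/
  R2 : Blk ⟨stb_vorbis.residue_config mem f, Off.sizeof.Residue * (stb_vorbis.residue_count mem f).toNat⟩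
  /-- R3 for the records below the counter -/
  R3 : ∀ i : Nat, i < n → stb_vorbis.residue_types mem f i ≤ 2
  /-- R4–R8b for the records below the counter -/
  record : ∀ i : Nat, i < n → ResidueAtOK Blk mem f (stb_vorbis.residue_config_at mem f i)

namespace ResidueOK
variable {Blk : Block → Prop} {mem : Mem} {f : Nat}

/-- R4 of record `i`. -/
theorem R4 (h : ResidueOK Blk mem f) (i : Nat) (hi : (i : Int) < stb_vorbis.residue_count mem f) :
    Residue.begin mem (stb_vorbis.residue_config_at mem f i) ≤ Residue.end_ mem (stb_vorbis.residue_config_at mem f i)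
      ∧ Residue.end_ mem (stb_vorbis.residue_config_at mem f i) < 2 ^ 24 := (h.record i hi).R4

/-- R5 of record `i`. -/
theorem R5 (h : ResidueOK Blk mem f) (i : Nat) (hi : (i : Int) < stb_vorbis.residue_count mem f) :
    1 ≤ Residue.part_size mem (stb_vorbis.residue_config_at mem f i)
      ∧ Residue.part_size mem (stb_vorbis.residue_config_at mem f i) ≤ 2 ^ 24 := (h.record i hi).R5

/-- R6 of record `i`. -/
theorem R6 (h : ResidueOK Blk mem f) (i : Nat) (hi : (i : Int) < stb_vorbis.residue_count mem f) :
    1 ≤ Residue.classifications mem (stb_vorbis.residue_config_at mem f i)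
      ∧ Residue.classifications mem (stb_vorbis.residue_config_at mem f i) ≤ 64 := (h.record i hi).R6

/-- R7 of record `i`. -/
theorem R7 (h : ResidueOK Blk mem f) (i : Nat) (hi : (i : Int) < stb_vorbis.residue_count mem f) :
    (Residue.classbook mem (stb_vorbis.residue_config_at mem f i) : Int) < stb_vorbis.codebook_count mem f :=
  (h.record i hi).R7

/-- R7b of record `i`. -/
theorem R7b (h : ResidueOK Blk mem f) (i : Nat) (hi : (i : Int) < stb_vorbis.residue_count mem f) :
    1 ≤ Residue.W mem f (stb_vorbis.residue_config_at mem f i) := (h.record i hi).R7b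

/-- The record index is below 64 (R1): `residue_types[i]` is inside `*f`. -/
theorem index_lt (h : ResidueOK Blk mem f) (i : Nat) (hi : (i : Int) < stb_vorbis.residue_count mem f) : i < 64 := by
  have := h.R1
  omega

/-- `ResidueOK` is the transient at `n = residue_count`. -/
theorem toUpTo (h : ResidueOK Blk mem f) : ResidueUpTo Blk mem f (stb_vorbis.residue_count mem f).toNat := by
  have h1 := h.R1
  exact ⟨by omega, h.R1, h.R2, fun i hi => h.R3 i (by omega), fun i hi => h.record i (by omega)⟩

end ResidueOK

namespace ResidueUpTo
variable {Blk : Block → Prop} {mem : Mem} {f n : Nat}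

/-- **After `memset(residue_config, 0, …)`** (start_decoder.R1 exit): nothing is claimed of any record yet. -/
theorem zero (h1 : 1 ≤ stb_vorbis.residue_count mem f ∧ stb_vorbis.residue_count mem f ≤ 64)
    (h2 : Blk ⟨stb_vorbis.residue_config mem f, Off.sizeof.Residue * (stb_vorbis.residue_count mem f).toNat⟩) :
    ResidueUpTo Blk mem f 0 :=
  ⟨by omega, h1, h2, fun i hi => by omega, fun i hi => by omega⟩

/-- **The step of the residue loop** (`++i` at the end of start_decoder.R7): record `n` is complete. -/
theorem succ (h : ResidueUpTo Blk mem f n) (hn : (n : Int) < stb_vorbis.residue_count mem f)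
    (h3 : stb_vorbis.residue_types mem f n ≤ 2) (hr : ResidueAtOK Blk mem f (stb_vorbis.residue_config_at mem f n)) :
    ResidueUpTo Blk mem f (n + 1) := by
  refine ⟨by omega, h.R1, h.R2, ?_, ?_⟩
  · intro i hi
    by_cases e : i = n
    · subst e
      exact h3
    · exact h.R3 i (by omega)
  · intro i hi
    by_cases e : i = n
    · subst e
      exact hr
    · exact h.record i (by omega)

/-- **The loop is left** (`i = residue_count`, SD.7): `ResidueOK`. -/
theorem toOK (h : ResidueUpTo Blk mem f n) (hn : (n : Int) = stb_vorbis.residue_count mem f) : ResidueOK Blk mem f :=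
  ⟨h.R1, h.R2, fun i hi => h.R3 i (by omega), fun i hi => h.record i (by omega)⟩

/-- A smaller counter. -/
theorem mono (h : ResidueUpTo Blk mem f n) {m : Nat} (hm : m ≤ n) : ResidueUpTo Blk mem f m :=
  ⟨by have := h.n_le; omega, h.R1, h.R2, fun i hi => h.R3 i (by omega), fun i hi => h.record i (by omega)⟩

end ResidueUpTo

/-! ### USE: the check sites

Every lemma returns a `Site Live a n` ("the `n` bytes at `a` lie inside one live block"); the worker turns it into what the
walker asks: `.acc hc`, `.acc_addr hc` (for `rdi = addr a`), `.acc_range hc`, `.has hc hL`, `.inside hc`. The address is a free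
`a` with an equation `ha` LAST, closed by `rfl` or by `simp only [vacc, voff]; omega`. -/

section use
variable {Live : Nat → Prop} {Blk : Block → Prop} {mem : Mem} {f : Nat}

/-- **`residue_config[i]`**: the `n` bytes at offset `off` of record `i < residue_count` (`r + {0,4,8,12,13,16,24}`: 23 sites of
decode_residue, the estimate loop, the residue loop of start_decoder, vorbis_deinit). From R2. -/
theorem ResidueUpTo.site_record {k : Nat} (hL : BlkLive Blk Live) (h : ResidueUpTo Blk mem f k) {i : Nat}
    (hi : (i : Int) < stb_vorbis.residue_count mem f) (off n : Nat) (hoff : off + n ≤ Off.sizeof.Residue) (hn : 1 ≤ n)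
    {a : Nat} (ha : a = stb_vorbis.residue_config_at mem f i + off) : Site Live a n := by
  subst ha
  apply Site.of_blk hL h.R2
  · simp only [vacc, voff]
    omega
  · simp only [vacc, voff] at hi hoff ⊢
    omega
  · exact hn

/-- **`residue_config[i]`** from `ResidueOK`. -/
theorem ResidueOK.site_record (hL : BlkLive Blk Live) (h : ResidueOK Blk mem f) {i : Nat}
    (hi : (i : Int) < stb_vorbis.residue_count mem f) (off n : Nat) (hoff : off + n ≤ Off.sizeof.Residue) (hn : 1 ≤ n)
    {a : Nat} (ha : a = stb_vorbis.residue_config_at mem f i + off) : Site Live a n :=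
  h.toUpTo.site_record hL hi off n hoff hn ha

/-- **`f->residue_types[i]`**, `i < residue_count ≤ 64`: inside `*f` (OB1 + R1). `h1` is R1's upper bound (`h.R1.2` of
`ResidueOK` or of `ResidueUpTo`). -/
theorem ResidueOK.site_type (hL : BlkLive Blk Live) (hob : Blk (objBlock f))
    (h1 : stb_vorbis.residue_count mem f ≤ 64) {i : Nat} (hi : (i : Int) < stb_vorbis.residue_count mem f) {a : Nat}
    (ha : a = f + Off.stb_vorbis.residue_types + Off.stb_vorbis.residue_types.elem * i) : Site Live a 2 := by
  subst ha
  apply Site.of_blk hL hob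
  · simp only [vblock, voff]
    omega
  · simp only [vblock, voff]
    omega
  · omega

variable {r : Nat}

/-- **`r->residue_books[c][pass]`**, `c < classifications`, `pass < 8` (load2 at `residue_books + 16c + 2·pass`). From R8. -/
theorem ResidueAtOK.site_book (hL : BlkLive Blk Live) (h : ResidueAtOK Blk mem f r) {c k : Nat}
    (hcl : c < Residue.classifications mem r) (hk : k < 8) {a : Nat}
    (ha : a = Residue.residue_books mem r + 16 * c + 2 * k) : Site Live a 2 := by
  subst ha
  apply Site.of_blk hL h.R8
  · simp only []
    omega
  · simp only []
    omega
  · omega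

/-- **`r->classdata[q]`**, `q < E` (load8 / store8 at `classdata + 8q`). From R8a. `q` comes from DECODE on the class book
after the `== EOP` test: `0 ≤ q < entries`. -/
theorem ResidueAtOK.site_classdata (hL : BlkLive Blk Live) (h : ResidueAtOK Blk mem f r) {q : Nat}
    (hq : q < Residue.E mem f r) {a : Nat} (ha : a = Residue.classdata mem r + 8 * q) : Site Live a 8 := by
  subst ha
  apply Site.of_blk hL h.R8a
  · simp only []
    omega
  · simp only []
    omega
  · omega

/-- **`r->classdata[q][k]`**, `q < E`, `k < classwords` (load1 / store1). From R8a's rows. -/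
theorem ResidueAtOK.site_row (hL : BlkLive Blk Live) (h : ResidueAtOK Blk mem f r) {q k : Nat}
    (hq : q < Residue.E mem f r) (hk : k < Residue.W mem f r) {a : Nat} (ha : a = Residue.row mem r q + k) :
    Site Live a 1 := by
  subst ha
  apply Site.of_blk hL (h.R8a_row q hq)
  · simp only []
    omega
  · simp only []
    omega
  · omega

/-- **The class book's header** `cbk + off` (`dimensions`, `entries`, … any field of the 2120-byte `Codebook`), given CB0's
block `Block(codebooks, 2120·codebook_count)` (owned by the codebook group, a hypothesis here). From R7. -/
theorem ResidueAtOK.site_cbk (hL : BlkLive Blk Live) (h : ResidueAtOK Blk mem f r)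
    (hcb : Blk ⟨stb_vorbis.codebooks mem f, Off.sizeof.Codebook * (stb_vorbis.codebook_count mem f).toNat⟩) (off n : Nat)
    (hoff : off + n ≤ Off.sizeof.Codebook) (hn : 1 ≤ n) {a : Nat} (ha : a = Residue.cbk mem f r + off) :
    Site Live a n := by
  subst ha
  have h7 := h.R7
  apply Site.of_blk hL hcb
  · simp only [vacc, voff]
    omega
  · simp only [vacc, voff] at hoff h7 ⊢
    omega
  · exact hn

/-- **A residue book** `f->codebooks + b` with `b = residue_books[c][pass] ≥ 0`: a field of that `Codebook` is inside CB0's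
block. From R8c. -/
theorem ResidueAtOK.site_book_codebook (hL : BlkLive Blk Live) (h : ResidueAtOK Blk mem f r)
    (hcb : Blk ⟨stb_vorbis.codebooks mem f, Off.sizeof.Codebook * (stb_vorbis.codebook_count mem f).toNat⟩) {c k : Nat}
    (hcl : c < Residue.classifications mem r) (hk : k < 8) (hb : 0 ≤ Residue.book mem r c k) (off n : Nat)
    (hoff : off + n ≤ Off.sizeof.Codebook) (hn : 1 ≤ n) {a : Nat}
    (ha : a = stb_vorbis.codebooks_at mem f (Residue.book mem r c k).toNat + off) : Site Live a n := by
  subst ha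
  have h8 := h.R8c c k hcl hk
  apply Site.of_blk hL hcb
  · simp only [stb_vorbis.codebooks_at, voff]
    omega
  · simp only [stb_vorbis.codebooks_at, voff] at hoff ⊢
    omega
  · exact hn

/-- R8c, the form the worker needs after the sign test: a non-negative book number is below `codebook_count`. -/
theorem ResidueAtOK.book_lt (h : ResidueAtOK Blk mem f r) {c k : Nat} (hcl : c < Residue.classifications mem r) (hk : k < 8)
    (hb : 0 ≤ Residue.book mem r c k) : Residue.book mem r c k < stb_vorbis.codebook_count mem f := by
  have h8 := h.R8c c k hcl hk
  omega

end use

/-! ### ROWPTR: a value that is one of the row pointers of `classdata` -/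

/-- **ROWPTR(v)** (CONTRACTS decode_residue `defs`): `v` is `classdata[q]` for some `q < E`. This is what a filled slot of
`part_classdata` holds; it gives `Block(v, classwords)` (R8a) and every byte of it `< classifications` (R8b). -/
def RowPtr (mem : Mem) (f r v : Nat) : Prop := ∃ q, q < Residue.E mem f r ∧ v = Residue.row mem r q

/-- The pointer just loaded from `classdata[q]` is a row pointer. -/
theorem RowPtr.of_row (mem : Mem) (f r : Nat) {q : Nat} (hq : q < Residue.E mem f r) : RowPtr mem f r (Residue.row mem r q) :=
  ⟨q, hq, rfl⟩

/-- **`part_classdata[j][class_set][i]`**: the load1 at `v + i`, `i < classwords`, for a row pointer `v`. -/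
theorem RowPtr.site {Live : Nat → Prop} {Blk : Block → Prop} {mem : Mem} {f r v : Nat} (hL : BlkLive Blk Live)
    (h : ResidueAtOK Blk mem f r) (hv : RowPtr mem f r v) {k : Nat} (hk : k < Residue.W mem f r) {a : Nat}
    (ha : a = v + k) : Site Live a 1 := by
  obtain ⟨q, hq, e⟩ := hv
  subst e
  exact h.site_row hL hq hk ha

/-- **The class number read through a row pointer is `< classifications`** (R8b): it indexes `residue_books[c]`. -/
theorem RowPtr.class_lt {Blk : Block → Prop} {mem : Mem} {f r v : Nat} (h : ResidueAtOK Blk mem f r) (hv : RowPtr mem f r v)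
    {k : Nat} (hk : k < Residue.W mem f r) : mem.u8 (v + k) < Residue.classifications mem r := by
  obtain ⟨q, hq, e⟩ := hv
  subst e
  exact h.R8b q k hq hk

end Vorbis
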